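-- pv_equiv track=rewrite | github.com/youremailaddress/AIMCTS | AlphaZero/alphazero.py | GetFlipedState
-- ===== SOURCE A (Python) =====
-- def GetFlipedState(temp,action):
--     mm,nn = action
--     temp[mm][nn] = 1
--     d = [[0, 1], [1, 1], [1, 0], [1, -1],
--          [0, -1], [-1, -1], [-1, 0], [-1, 1]]
--     for x,y in d:
--         flag = 0
--         for count in range(1,8):
--             if mm+count*x>7 or mm+count*x <0 or nn+count*y>7 or nn+count*y<0:
--                 continue
--             if temp[mm+count*x][nn+count*y] == 1:
--                 flag = count
--                 break
--         while flag > 0: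
--             temp[mm+flag*x][nn+flag*y] = 1
--             flag -= 1
--     return temp
-- ===== SOURCE B (Python) =====
-- def GetFlipedState(temp, action):
--     # Mutates temp in place, like the original; also returns it.
--     mm, nn = action
--     temp[mm][nn] = 1
--
--     def flip(x, y, c):
--         # Walk outward recursively; a terminating on-board 1 makes every
--         # frame on the way back flip its own cell.
--         if c > 7:
--             return False
--         i, j = mm + c * x, nn + c * y
--         if 0 <= i <= 7 and 0 <= j <= 7 and temp[i][j] == 1:
--             return True
--         if flip(x, y, c + 1):
--             temp[i][j] = 1
--             return True
--         return False
--
--     for x, y in ((0, 1), (1, 1), (1, 0), (1, -1),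
--                  (0, -1), (-1, -1), (-1, 0), (-1, 1)):
--         flip(x, y, 1)
--     return temp
-- ===== Notes on version B (the rewrite author's own statement) =====
-- stated objective: alternative
-- what changed: A scans each ray iteratively for an integer flag and then runs a separate while-countdown backfill loop recomputing coordinates; B replaces both loops by one recursive descent per ray whose boolean result propagates back up the stack, each frame flipping its own cell during the unwinding.
import Mathlib
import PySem

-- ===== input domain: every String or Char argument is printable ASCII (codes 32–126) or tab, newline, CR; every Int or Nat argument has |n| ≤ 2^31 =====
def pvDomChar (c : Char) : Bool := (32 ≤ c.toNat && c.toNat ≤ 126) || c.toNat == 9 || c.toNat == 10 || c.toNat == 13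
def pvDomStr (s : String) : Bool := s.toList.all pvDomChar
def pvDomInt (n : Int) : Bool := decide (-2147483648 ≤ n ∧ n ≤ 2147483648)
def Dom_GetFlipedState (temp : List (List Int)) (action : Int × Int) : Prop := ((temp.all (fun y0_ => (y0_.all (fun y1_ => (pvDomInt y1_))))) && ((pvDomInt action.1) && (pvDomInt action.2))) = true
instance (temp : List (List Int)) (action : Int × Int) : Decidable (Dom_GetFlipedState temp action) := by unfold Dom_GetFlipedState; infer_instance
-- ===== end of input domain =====

-- B replaces A's per-direction scan-for-a-flag plus while-countdown backfill by a single
-- recursive descent per ray that flips each frame's cell while the stack unwinds; same return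
-- value wherever A returns, and like A the Python B mutates temp in place — the equivalence
-- proved here is about the return value.

-- ===== PORT A =====
-- temp[i][j] = v  (Python list assignment; the row is looked up, then written back)
def pySet2 (t : List (List Int)) (i j v : Int) : List (List Int) :=
  match PySem.List.pyGet? t i with
  | some row => PySem.List.pySetD t i (PySem.List.pySetD row j v)
  | none => t

-- temp[i][j]  (read; none = IndexError)
def pyGet2 (t : List (List Int)) (i j : Int) : Option Int :=
  (PySem.List.pyGet? t i).bind (fun row => PySem.List.pyGet? row j)

-- the inner 'for count in range(1,8)' loop computing flag (0 if no terminating 1 found)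
def scanA (t : List (List Int)) (mm nn x y : Int) : List Int → Int
  | [] => 0
  | c :: rest =>
    if mm + c * x > 7 ∨ mm + c * x < 0 ∨ nn + c * y > 7 ∨ nn + c * y < 0 then
      scanA t mm nn x y rest
    else if pyGet2 t (mm + c * x) (nn + c * y) == some 1 then c
    else scanA t mm nn x y rest

-- the 'while flag > 0' backfill loop
def backfillA (mm nn x y : Int) (t : List (List Int)) : Nat → List (List Int)
  | 0 => t
  | k + 1 => backfillA mm nn x y (pySet2 t (mm + ((k : Int) + 1) * x) (nn + ((k : Int) + 1) * y) 1) k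

def GetFlipedState (temp : List (List Int)) (action : Int × Int) : List (List Int) :=
  let mm := action.1
  let nn := action.2
  let t0 := pySet2 temp mm nn 1
  ([((0 : Int), (1 : Int)), (1, 1), (1, 0), (1, -1), (0, -1), (-1, -1), (-1, 0), (-1, 1)]).foldl
    (fun t d => backfillA mm nn d.1 d.2 t (scanA t mm nn d.1 d.2 [1, 2, 3, 4, 5, 6, 7]).toNat) t0

-- ===== PORT B =====
-- the recursive 'flip(x, y, c)': walk outward; a terminating on-board 1 makes every frame on the
-- way back flip its own cell (the returned pair carries flip's boolean and the mutated temp)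
def rayB (mm nn x y : Int) (t : List (List Int)) (c : Int) : Bool × List (List Int) :=
  if _h : 7 < c then (false, t)
  else
    let i := mm + c * x
    let j := nn + c * y
    if (0 ≤ i ∧ i ≤ 7 ∧ 0 ≤ j ∧ j ≤ 7) ∧ pyGet2 t i j == some 1 then (true, t)
    else
      match rayB mm nn x y t (c + 1) with
      | (true, t') => (true, pySet2 t' i j 1)
      | r => r
termination_by (8 - c).toNat
decreasing_by omega

def GetFlipedState_alt (temp : List (List Int)) (action : Int × Int) : List (List Int) :=
  let mm := action.1
  let nn := action.2
  let t0 := pySet2 temp mm nn 1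
  ([((0 : Int), (1 : Int)), (1, 1), (1, 0), (1, -1), (0, -1), (-1, -1), (-1, 0), (-1, 1)]).foldl
    (fun t d => (rayB mm nn d.1 d.2 t 1).2) t0

-- ===== PRECONDITION & SPEC =====
-- the row temp[i] (empty when i is out of range; used only for its length and cell values)
def pvRowAt (temp : List (List Int)) (i : Int) : List Int := (PySem.List.pyGet? temp i).getD []

-- step c of the ray from the action cell along direction d lands on the 8x8 window
def pvWin (_temp : List (List Int)) (action : Int × Int) (d : Int × Int) (c : Int) : Prop :=
  0 ≤ action.1 + c * d.1 ∧ action.1 + c * d.1 ≤ 7 ∧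
  0 ≤ action.2 + c * d.2 ∧ action.2 + c * d.2 ≤ 7

-- the board cell at step c exists (the scan's read does not raise)
def pvCellExists (temp : List (List Int)) (action : Int × Int) (d : Int × Int) (c : Int) : Prop :=
  action.1 + c * d.1 < (temp.length : Int) ∧
  action.2 + c * d.2 < ((pvRowAt temp (action.1 + c * d.1)).length : Int)

-- step c is an on-window, existing cell that reads 1 (the action cell itself, set to 1 first, or a 1 already on the board)
def pvHit (temp : List (List Int)) (action : Int × Int) (d : Int × Int) (c : Int) : Prop :=
  pvWin temp action d c ∧ pvCellExists temp action d c ∧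
  ((PySem.List.pyIdx? temp.length (action.1 + c * d.1) = PySem.List.pyIdx? temp.length action.1 ∧
    PySem.List.pyIdx? (pvRowAt temp (action.1 + c * d.1)).length (action.2 + c * d.2)
      = PySem.List.pyIdx? (pvRowAt temp (action.1 + c * d.1)).length action.2) ∨
   PySem.List.pyGetD (pvRowAt temp (action.1 + c * d.1)) (action.2 + c * d.2) 0 = 1)

-- Pre_ = exactly the inputs on which Python A returns (no IndexError): the initial write
-- temp[mm][nn] = 1 is in range, and per direction every on-window cell scanned before the first
-- terminating 1 (taking the just-written action cell into account) exists, and every off-window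
-- coordinate the backfill then wrap-writes is in range.
def Pre_GetFlipedState (temp : List (List Int)) (action : Int × Int) : Prop :=
  PySem.Raise.InRange temp.length action.1 ∧
  PySem.Raise.InRange (pvRowAt temp action.1).length action.2 ∧
  ∀ d ∈ ([((0 : Int), (1 : Int)), (1, 1), (1, 0), (1, -1), (0, -1), (-1, -1), (-1, 0), (-1, 1)] : List (Int × Int)),
    (∀ c ∈ ([1, 2, 3, 4, 5, 6, 7] : List Int),
      pvWin temp action d c → (∀ c' ∈ ([1, 2, 3, 4, 5, 6, 7] : List Int), c' < c → ¬ pvHit temp action d c') →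
      pvCellExists temp action d c) ∧
    (∀ hp ∈ ([1, 2, 3, 4, 5, 6, 7] : List Int),
      pvHit temp action d hp → (∀ c' ∈ ([1, 2, 3, 4, 5, 6, 7] : List Int), c' < hp → ¬ pvHit temp action d c') →
      ∀ k ∈ ([1, 2, 3, 4, 5, 6, 7] : List Int), k < hp → ¬ pvWin temp action d k →
      PySem.Raise.InRange temp.length (action.1 + k * d.1) ∧
      PySem.Raise.InRange (pvRowAt temp (action.1 + k * d.1)).length (action.2 + k * d.2))
instance (temp : List (List Int)) (action : Int × Int) : Decidable (Pre_GetFlipedState temp action) := by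
  unfold Pre_GetFlipedState pvHit pvWin pvCellExists PySem.Raise.InRange
  refine @instDecidableAnd _ _ inferInstance (@instDecidableAnd _ _ inferInstance ?_)
  exact @List.decidableBAll _ _ (fun d => @instDecidableAnd _ _ inferInstance inferInstance) _

def pvWitness_GetFlipedState : List (List Int) × (Int × Int) :=
  ([[0,0,0,0,0,0,0,0],[0,2,1,0,0,0,0,0],[0,0,0,0,0,0,0,0],[0,0,0,0,0,0,0,0],
    [0,0,0,0,1,0,0,0],[0,0,0,0,0,0,0,0],[0,0,0,0,0,0,0,0],[0,0,0,0,0,0,0,0]], (3, 3))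

def Spec_GetFlipedState (temp : List (List Int)) (action : Int × Int) (out : List (List Int)) : Prop := out = GetFlipedState_alt temp action
instance (temp : List (List Int)) (action : Int × Int) (out : List (List Int)) : Decidable (Spec_GetFlipedState temp action out) := by unfold Spec_GetFlipedState; infer_instance

-- ===== CLAIM (what is proved, stated in full; the proofs are below) =====
def Claim_equal_GetFlipedState : Prop := ∀ (temp : List (List Int)) (action : Int × Int), Dom_GetFlipedState temp action → Pre_GetFlipedState temp action → Spec_GetFlipedState temp action (GetFlipedState temp action)

-- ===== LEMMAS AND PROOFS =====

-- coordinates written by A's backfill from step n down to 1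
def descCoords (mm nn x y : Int) : Nat → List (Int × Int)
  | 0 => []
  | k + 1 => (mm + ((k : Int) + 1) * x, nn + ((k : Int) + 1) * y) :: descCoords mm nn x y k

-- apply the writes of a coordinate list in order
def commitW (t : List (List Int)) (pend : List (Int × Int)) : List (List Int) :=
  pend.foldl (fun u p => pySet2 u p.1 p.2 1) t

def countsFrom (k fuel : Nat) : List Int := (List.range fuel).map (fun i => ((k + i : Nat) : Int))

-- normal form of a Python single item assignment xs[i] = v (no-op where Python raises)
def setRow {α : Type} (row : List α) (j : Int) (v : α) : List α :=
  match PySem.List.pyIdx? row.length j with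
  | some m => row.set m v
  | none => row

theorem setRow_of_idx {α : Type} (row : List α) (j : Int) (v : α) (m : Nat)
    (h : PySem.List.pyIdx? row.length j = some m) : setRow row j v = row.set m v := by
  simp [setRow, h]

-- normal form of pySet2: resolve the row index, then the column index
def set2N (t : List (List Int)) (i j v : Int) : List (List Int) :=
  match PySem.List.pyIdx? t.length i with
  | some n => t.set n (setRow (t.getD n []) j v)
  | none => t

theorem idx_lt {n : Nat} {i : Int} {k : Nat} (h : PySem.List.pyIdx? n i = some k) : k < n := by
  unfold PySem.List.pyIdx? at h
  split_ifs at h <;> simp_all <;> omega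

theorem getD_eq_getElem_of_lt (t : List (List Int)) (n : Nat) (h : n < t.length) :
    t[n]? = some (t.getD n []) := by
  rw [List.getD_eq_getElem?_getD, List.getElem?_eq_getElem h, Option.getD_some]

theorem pySetD_eq_setRow {α : Type} (row : List α) (j : Int) (v : α) :
    PySem.List.pySetD row j v = setRow row j v := by
  unfold PySem.List.pySetD PySem.List.pySet? setRow
  cases h : PySem.List.pyIdx? row.length j <;> simp

theorem pySet2_eq_set2N (t : List (List Int)) (i j v : Int) :
    pySet2 t i j v = set2N t i j v := by
  unfold pySet2 set2N PySem.List.pyGet?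
  cases h : PySem.List.pyIdx? t.length i with
  | none => simp
  | some n =>
    have hget := getD_eq_getElem_of_lt t n (idx_lt h)
    have hb : ((some n).bind fun k => t[k]?) = t[n]? := rfl
    rw [hb, hget]
    show PySem.List.pySetD t i (PySem.List.pySetD (t.getD n []) j v)
        = t.set n (setRow (t.getD n []) j v)
    rw [pySetD_eq_setRow, pySetD_eq_setRow, setRow_of_idx t i _ n h]

theorem pyGet2_char (t : List (List Int)) (i j : Int) :
    pyGet2 t i j = (match PySem.List.pyIdx? t.length i with
      | some n => PySem.List.pyGet? (t.getD n []) j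
      | none => none) := by
  unfold pyGet2 PySem.List.pyGet?
  cases h : PySem.List.pyIdx? t.length i with
  | none => simp
  | some n =>
    have hget := getD_eq_getElem_of_lt t n (idx_lt h)
    have hb : ((some n).bind fun k => t[k]?) = t[n]? := rfl
    rw [hb, hget]
    rfl

theorem setRow_noop (row : List Int) (j v : Int) (h : PySem.List.pyGet? row j = some v) :
    setRow row j v = row := by
  unfold PySem.List.pyGet? at h
  unfold setRow
  cases hm : PySem.List.pyIdx? row.length j with
  | none => rfl
  | some m =>
    have hlt := idx_lt hm
    rw [hm] at h
    have h2 : row[m]? = some v := h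
    rw [List.getElem?_eq_getElem hlt] at h2
    have hv : row[m]'hlt = v := by injection h2
    show row.set m v = row
    rw [← hv, List.set_getElem_self]

theorem pySet2_noop (t : List (List Int)) (i j v : Int) (h : pyGet2 t i j = some v) :
    pySet2 t i j v = t := by
  rw [pySet2_eq_set2N, pyGet2_char] at *
  unfold set2N
  cases hn : PySem.List.pyIdx? t.length i with
  | none => rfl
  | some n =>
    rw [hn] at h
    have h2 : PySem.List.pyGet? (t.getD n []) j = some v := h
    show t.set n (setRow (t.getD n []) j v) = t
    rw [setRow_noop _ _ _ h2]
    have heq : t.getD n [] = t[n]'(idx_lt hn) := by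
      rw [List.getD_eq_getElem?_getD, List.getElem?_eq_getElem (idx_lt hn), Option.getD_some]
    rw [heq, List.set_getElem_self]

theorem commitW_cons (t : List (List Int)) (a b : Int) (l : List (Int × Int)) :
    commitW t ((a, b) :: l) = commitW (pySet2 t a b 1) l := rfl

theorem backfill_eq_commit (mm nn x y : Int) : ∀ (n : Nat) (t : List (List Int)),
    backfillA mm nn x y t n = commitW t (descCoords mm nn x y n) := by
  intro n
  induction n with
  | zero => intro t; rfl
  | succ k ih =>
    intro t
    have h1 : backfillA mm nn x y t (k + 1)
        = backfillA mm nn x y (pySet2 t (mm + ((k : Int) + 1) * x) (nn + ((k : Int) + 1) * y) 1) k := rfl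
    rw [h1, ih, ← commitW_cons]
    rfl

theorem countsFrom_succ (k fuel : Nat) :
    countsFrom k (fuel + 1) = (k : Int) :: countsFrom (k + 1) fuel := by
  unfold countsFrom
  rw [List.range_succ_eq_map]
  simp only [List.map_cons, List.map_map]
  refine List.cons_eq_cons.mpr ⟨congrArg Nat.cast (by omega), ?_⟩
  apply List.map_congr_left
  intro i _
  simp only [Function.comp_apply]
  exact congrArg Nat.cast (by omega)

-- the main per-direction induction: A's scan+backfill = B's recursion, with the writes of the
-- outer frames still pending (commitW … (descCoords … j) when the recursion reports a hit)
theorem main_dir (mm nn x y : Int) :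
    ∀ (fuel j : Nat), j + fuel = 7 → ∀ (t : List (List Int)),
    backfillA mm nn x y t (scanA t mm nn x y (countsFrom (j + 1) fuel)).toNat
      = (if (rayB mm nn x y t ((j : Int) + 1)).1
          then commitW (rayB mm nn x y t ((j : Int) + 1)).2 (descCoords mm nn x y j)
          else (rayB mm nn x y t ((j : Int) + 1)).2) := by
  intro fuel
  induction fuel with
  | zero =>
    intro j hj t
    have hj7 : j = 7 := by omega
    subst hj7
    rw [show ((7 : Nat) : Int) + 1 = 8 by norm_num]
    rw [show rayB mm nn x y t 8 = (false, t) from by rw [rayB]; simp]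
    rfl
  | succ f ih =>
    intro j hj t
    rw [countsFrom_succ]
    have hcast : ((j + 1 : Nat) : Int) = (j : Int) + 1 := by push_cast; ring
    rw [hcast]
    have hle : ¬ (7 : Int) < (j : Int) + 1 := by omega
    have hcons : descCoords mm nn x y (j + 1)
        = (mm + ((j : Int) + 1) * x, nn + ((j : Int) + 1) * y) :: descCoords mm nn x y j := rfl
    by_cases hwin : 0 ≤ mm + ((j : Int) + 1) * x ∧ mm + ((j : Int) + 1) * x ≤ 7 ∧
        0 ≤ nn + ((j : Int) + 1) * y ∧ nn + ((j : Int) + 1) * y ≤ 7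
    · have hguard : ¬(mm + ((j : Int) + 1) * x > 7 ∨ mm + ((j : Int) + 1) * x < 0 ∨
          nn + ((j : Int) + 1) * y > 7 ∨ nn + ((j : Int) + 1) * y < 0) := by omega
      by_cases hcell : pyGet2 t (mm + ((j : Int) + 1) * x) (nn + ((j : Int) + 1) * y) = some 1
      · -- frame (j+1) is the terminating 1: A backfills j+1..1, B returns (true, t)
        have hscan : scanA t mm nn x y (((j : Int) + 1) :: countsFrom (j + 1 + 1) f)
            = (j : Int) + 1 := by
          simp only [scanA]
          rw [if_neg hguard, if_pos (by simp [hcell])]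
        have hray : rayB mm nn x y t ((j : Int) + 1) = (true, t) := by
          rw [rayB]
          simp only [dif_neg hle]
          rw [if_pos ⟨hwin, by simp [hcell]⟩]
        rw [hscan, hray]
        have htn : ((j : Int) + 1).toNat = j + 1 := by omega
        rw [htn, backfill_eq_commit, hcons, commitW_cons, pySet2_noop _ _ _ _ hcell]
        simp
      · -- frame (j+1) recurses; on a deeper hit it flips its own cell on the way back
        have hscan : scanA t mm nn x y (((j : Int) + 1) :: countsFrom (j + 1 + 1) f)
            = scanA t mm nn x y (countsFrom (j + 1 + 1) f) := by
          simp only [scanA]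
          rw [if_neg hguard, if_neg (by simp [hcell])]
        have hray : rayB mm nn x y t ((j : Int) + 1)
            = (match rayB mm nn x y t ((j : Int) + 1 + 1) with
               | (true, t') => (true, pySet2 t' (mm + ((j : Int) + 1) * x) (nn + ((j : Int) + 1) * y) 1)
               | r => r) := by
          rw [rayB]
          simp only [dif_neg hle]
          rw [if_neg (fun hcon => hcell (by simpa using hcon.2))]
        rw [hscan, hray]
        have hcast2 : ((j + 1 : Nat) : Int) + 1 = (j : Int) + 1 + 1 := by push_cast; ring
        have := ih (j + 1) (by omega) t
        rw [hcast2] at this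
        rw [this]
        cases hr : rayB mm nn x y t ((j : Int) + 1 + 1) with
        | mk b t' =>
          cases b with
          | true => simp [hcons, commitW_cons]
          | false => simp
    · -- frame (j+1) is off the 8x8 window: A's scan skips it; B recurses and wrap-writes it back
      have hguard : mm + ((j : Int) + 1) * x > 7 ∨ mm + ((j : Int) + 1) * x < 0 ∨
          nn + ((j : Int) + 1) * y > 7 ∨ nn + ((j : Int) + 1) * y < 0 := by omega
      have hscan : scanA t mm nn x y (((j : Int) + 1) :: countsFrom (j + 1 + 1) f)
          = scanA t mm nn x y (countsFrom (j + 1 + 1) f) := by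
        simp only [scanA]
        rw [if_pos hguard]
      have hray : rayB mm nn x y t ((j : Int) + 1)
          = (match rayB mm nn x y t ((j : Int) + 1 + 1) with
             | (true, t') => (true, pySet2 t' (mm + ((j : Int) + 1) * x) (nn + ((j : Int) + 1) * y) 1)
             | r => r) := by
        rw [rayB]
        simp only [dif_neg hle]
        rw [if_neg (fun hcon => hwin hcon.1)]
      rw [hscan, hray]
      have hcast2 : ((j + 1 : Nat) : Int) + 1 = (j : Int) + 1 + 1 := by push_cast; ring
      have := ih (j + 1) (by omega) t
      rw [hcast2] at this
      rw [this]
      cases hr : rayB mm nn x y t ((j : Int) + 1 + 1) with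
      | mk b t' =>
        cases b with
        | true => simp [hcons, commitW_cons]
        | false => simp

theorem step_eq (mm nn x y : Int) (t : List (List Int)) :
    backfillA mm nn x y t (scanA t mm nn x y [1, 2, 3, 4, 5, 6, 7]).toNat
      = (rayB mm nn x y t 1).2 := by
  have h := main_dir mm nn x y 7 0 (by norm_num) t
  have hc : countsFrom 1 7 = [1, 2, 3, 4, 5, 6, 7] := by decide
  rw [hc] at h
  simpa [descCoords, commitW] using h

theorem fold_eq (mm nn : Int) : ∀ (ds : List (Int × Int)) (t : List (List Int)),
    ds.foldl (fun t d => backfillA mm nn d.1 d.2 t (scanA t mm nn d.1 d.2 [1, 2, 3, 4, 5, 6, 7]).toNat) t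
      = ds.foldl (fun t d => (rayB mm nn d.1 d.2 t 1).2) t := by
  intro ds
  induction ds with
  | nil => intro t; rfl
  | cons d ds ih =>
    intro t
    simp only [List.foldl_cons]
    rw [step_eq mm nn d.1 d.2 t]
    exact ih _

-- ===== VERDICT (by name: the statement is the Claim_ definition above) =====
theorem GetFlipedState_spec : Claim_equal_GetFlipedState := by
  intro temp action _ _
  unfold Spec_GetFlipedState
  simp only [GetFlipedState, GetFlipedState_alt]
  exact fold_eq action.1 action.2 _ _
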